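-- pv_equiv track=rewrite | github.com/MarconyxD/text-processing | Script 04.py | posting_lists_union
-- ===== SOURCE A (Python) =====
-- def posting_lists_union(pl1, pl2):
--         """
--         Retorna uma nova lista de postagens resultante da união das duas listas
--         passadas como argumentos.
--         """
--         pl1 = sorted(list(pl1))
--         pl2 = sorted(list(pl2))
--         union = []
--         i = 0
--         j = 0
--         while (i < len(pl1) and j < len(pl2)):
--             if (pl1[i] == pl2[j]):
--                 union.append(pl1[i])
--                 i += 1
--                 j += 1
--             elif (pl1[i] < pl2[j]):
--                 union.append(pl1[i])
--                 i += 1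
--             else:
--                 union.append(pl2[j])
--                 j += 1
--         for k in range(i, len(pl1)):
--             union.append(pl1[k])
--         for k in range(j, len(pl2)):
--             union.append(pl2[k])
--         return union
-- ===== SOURCE B (Python) =====
-- def posting_lists_union(pl1, pl2):
--     """Union of two posting lists: each value appears max(count in pl1, count in pl2)
--     times, in sorted order. Frequency-count + expand instead of sort-and-merge."""
--     c1 = {}
--     for v in pl1:
--         c1[v] = c1.get(v, 0) + 1
--     c2 = {}
--     for v in pl2:
--         c2[v] = c2.get(v, 0) + 1
--     union = []
--     for v in sorted(set(c1) | set(c2)):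
--         union.extend([v] * max(c1.get(v, 0), c2.get(v, 0)))
--     return union
-- ===== Notes on version B (the rewrite author's own statement) =====
-- stated objective: alternative
-- what changed: Replaces the sort-both-lists-then-two-pointer merge with a frequency-count pass: build count dicts for both lists, sort the distinct keys once, and emit each key max(count1, count2) times.
import Mathlib
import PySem

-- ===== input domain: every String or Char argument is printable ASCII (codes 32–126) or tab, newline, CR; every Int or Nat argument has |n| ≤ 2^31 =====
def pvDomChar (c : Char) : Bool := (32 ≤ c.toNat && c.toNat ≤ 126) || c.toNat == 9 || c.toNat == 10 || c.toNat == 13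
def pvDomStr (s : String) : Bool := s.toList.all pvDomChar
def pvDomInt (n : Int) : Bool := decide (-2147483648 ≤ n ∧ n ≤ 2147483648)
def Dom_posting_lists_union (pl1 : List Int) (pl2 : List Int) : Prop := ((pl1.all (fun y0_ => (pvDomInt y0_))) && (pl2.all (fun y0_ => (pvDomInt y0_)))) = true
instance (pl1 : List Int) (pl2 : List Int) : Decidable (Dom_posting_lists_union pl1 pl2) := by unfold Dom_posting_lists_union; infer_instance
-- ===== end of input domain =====

-- B replaces A's sort-both-lists-then-two-pointer merge with a frequency-count pass
-- (count both lists, sort the distinct keys once, emit each key max(c1,c2) times);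
-- alternative algorithm, same exact result.

-- ===== PORT A =====
-- A's while loop over indices i, j plus its two trailing for-loops, as structural
-- recursion on the remaining suffixes pl1[i:], pl2[j:]
def pvMergeA : List Int → List Int → List Int
  | [], ys => ys
  | x :: xs, [] => x :: xs
  | x :: xs, y :: ys =>
    if x = y then x :: pvMergeA xs ys
    else if x < y then x :: pvMergeA xs (y :: ys)
    else y :: pvMergeA (x :: xs) ys

def posting_lists_union (pl1 : List Int) (pl2 : List Int) : List Int :=
  let s1 := PySem.List.sorted pl1 (fun x => x) false
  let s2 := PySem.List.sorted pl2 (fun x => x) false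
  pvMergeA s1 s2

-- ===== PORT B =====
def posting_lists_union_alt (pl1 : List Int) (pl2 : List Int) : List Int :=
  let c1 := pl1.foldl (fun d x => d.insert x (d.getD x 0 + 1)) (PySem.Dict.empty : PySem.Dict Int Int)
  let c2 := pl2.foldl (fun d x => d.insert x (d.getD x 0 + 1)) (PySem.Dict.empty : PySem.Dict Int Int)
  let ks := PySem.List.sorted (PySem.Set.ofList (c1.keys ++ c2.keys)) (fun x => x) false
  ks.foldl (fun out v => out ++ List.replicate (max (c1.getD v 0) (c2.getD v 0)).toNat v) []

-- ===== PRECONDITION & SPEC =====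
def Spec_posting_lists_union (pl1 : List Int) (pl2 : List Int) (out : List Int) : Prop := out = posting_lists_union_alt pl1 pl2
instance (pl1 : List Int) (pl2 : List Int) (out : List Int) : Decidable (Spec_posting_lists_union pl1 pl2 out) := by unfold Spec_posting_lists_union; infer_instance

-- ===== CLAIM (what is proved, stated in full; the proofs are below) =====
def Claim_equal_posting_lists_union : Prop := ∀ (pl1 : List Int) (pl2 : List Int), Dom_posting_lists_union pl1 pl2 → Spec_posting_lists_union pl1 pl2 (posting_lists_union pl1 pl2)

-- ===== LEMMAS AND PROOFS =====

theorem pvMergeA_mem (s1 s2 : List Int) (z : Int) (hz : z ∈ pvMergeA s1 s2) : z ∈ s1 ∨ z ∈ s2 := by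
  fun_induction pvMergeA s1 s2
  · right; exact hz
  · left; exact hz
  all_goals simp_all; tauto

theorem pvMergeA_pairwise (s1 s2 : List Int)
    (h1 : s1.Pairwise (· ≤ ·)) (h2 : s2.Pairwise (· ≤ ·)) :
    (pvMergeA s1 s2).Pairwise (· ≤ ·) := by
  fun_induction pvMergeA s1 s2
  · exact h2
  · exact h1
  case case3 xs y ys ih =>
    rw [List.pairwise_cons] at h1 h2 ⊢
    refine ⟨fun b hb => ?_, ih h1.2 h2.2⟩
    rcases pvMergeA_mem _ _ _ hb with h | h
    · exact h1.1 b h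
    · exact h2.1 b h
  case case4 x xs y ys hne hlt ih =>
    rw [List.pairwise_cons] at h1 ⊢
    refine ⟨fun b hb => ?_, ih h1.2 h2⟩
    rcases pvMergeA_mem _ _ _ hb with h | h
    · exact h1.1 b h
    · rcases List.mem_cons.mp h with rfl | h
      · exact le_of_lt hlt
      · exact le_trans (le_of_lt hlt) ((List.pairwise_cons.mp h2).1 b h)
  case case5 x xs y ys hne hlt ih =>
    rw [List.pairwise_cons] at h2 ⊢
    refine ⟨fun b hb => ?_, ih h1 h2.2⟩
    have hyx : y ≤ x := by omega
    rcases pvMergeA_mem _ _ _ hb with h | h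
    · rcases List.mem_cons.mp h with rfl | h
      · exact hyx
      · exact le_trans hyx ((List.pairwise_cons.mp h1).1 b h)
    · exact h2.1 b h

theorem pvMergeA_count (s1 s2 : List Int)
    (h1 : s1.Pairwise (· ≤ ·)) (h2 : s2.Pairwise (· ≤ ·)) (v : Int) :
    (pvMergeA s1 s2).count v = max (s1.count v) (s2.count v) := by
  fun_induction pvMergeA s1 s2
  · simp
  · simp
  case case3 xs y ys ih =>
    rw [List.pairwise_cons] at h1 h2
    simp only [List.count_cons, ih h1.2 h2.2]
    omega
  case case4 x xs y ys hne hlt ih =>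
    rw [List.pairwise_cons] at h1
    have hc : (y :: ys).count x = 0 := by
      rw [List.count_eq_zero]
      intro hmem
      rcases List.mem_cons.mp hmem with rfl | h
      · omega
      · have := (List.pairwise_cons.mp h2).1 x h; omega
    rw [List.count_cons, ih h1.2 h2]
    by_cases hv : x = v
    · subst hv
      rw [hc]
      simp only [List.count_cons]
      omega
    · simp only [List.count_cons, beq_iff_eq, if_neg hv]
      omega
  case case5 x xs y ys hne hlt ih =>
    rw [List.pairwise_cons] at h2
    have hc : (x :: xs).count y = 0 := by
      rw [List.count_eq_zero]
      intro hmem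
      rcases List.mem_cons.mp hmem with rfl | h
      · omega
      · have := (List.pairwise_cons.mp h1).1 y h; omega
    rw [List.count_cons, ih h1 h2.2]
    by_cases hv : y = v
    · subst hv
      rw [hc]
      simp only [List.count_cons]
      omega
    · simp only [List.count_cons, beq_iff_eq, if_neg hv]
      omega

theorem count_flatMap_replicate (ks : List Int) (m : Int → Nat) (hnd : ks.Nodup) (v : Int) :
    (ks.flatMap (fun w => List.replicate (m w) w)).count v = if v ∈ ks then m v else 0 := by
  induction ks with
  | nil => simp
  | cons k t ih =>
    rw [List.nodup_cons] at hnd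
    simp only [List.flatMap_cons, List.count_append, ih hnd.2, List.mem_cons, List.count_replicate]
    by_cases hv : v = k
    · subst hv; simp [hnd.1]
    · simp [hv, Ne.symm hv]

theorem pairwise_flatMap_replicate (ks : List Int) (m : Int → Nat)
    (h : ks.Pairwise (· < ·)) :
    (ks.flatMap (fun w => List.replicate (m w) w)).Pairwise (· ≤ ·) := by
  induction ks with
  | nil => simp
  | cons k t ih =>
    rw [List.pairwise_cons] at h
    simp only [List.flatMap_cons]
    rw [List.pairwise_append]
    refine ⟨List.pairwise_replicate.mpr (by simp), ih h.2, ?_⟩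
    intro a ha b hb
    rcases List.eq_of_mem_replicate ha with rfl
    rcases List.mem_flatMap.mp hb with ⟨w, hw, hbw⟩
    rcases List.eq_of_mem_replicate hbw with rfl
    exact le_of_lt (h.1 _ hw)
theorem pv_main (pl1 pl2 : List Int) :
    pvMergeA (PySem.List.sorted pl1 (fun x => x) false) (PySem.List.sorted pl2 (fun x => x) false)
      = posting_lists_union_alt pl1 pl2 := by
  unfold posting_lists_union_alt
  have hc1 : pl1.foldl (fun d x => d.insert x (d.getD x 0 + 1)) (PySem.Dict.empty : PySem.Dict Int Int) = PySem.Dict.counter pl1 :=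
    PySem.Dict.foldl_insert_getD_add_one_eq_counter pl1
  have hc2 : pl2.foldl (fun d x => d.insert x (d.getD x 0 + 1)) (PySem.Dict.empty : PySem.Dict Int Int) = PySem.Dict.counter pl2 :=
    PySem.Dict.foldl_insert_getD_add_one_eq_counter pl2
  rw [hc1, hc2]
  simp only [PySem.Dict.getD_counter, PySem.Dict.keys_counter]
  set s1 := PySem.List.sorted pl1 (fun x => x) false with hs1
  set s2 := PySem.List.sorted pl2 (fun x => x) false with hs2
  set ks := PySem.List.sorted (PySem.Set.ofList ((PySem.Set.ofList pl1 : List Int) ++ (PySem.Set.ofList pl2 : List Int))) (fun x => x) false with hks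
  set m : Int → Nat := fun v => (max ((pl1.count v : Int)) ((pl2.count v : Int))).toNat with hm
  have hfold : ks.foldl (fun out v => out ++ List.replicate (max ((pl1.count v : Int)) ((pl2.count v : Int))).toNat v) []
      = ks.flatMap (fun v => List.replicate (m v) v) := by
    rw [PySem.List.foldl_append_eq_flatMap]
    simp [hm]
  rw [hfold]
  have hkslt : ks.Pairwise (· < ·) := PySem.List.sorted_ofList_pairwise_lt _
  have hmemks : ∀ v : Int, v ∈ ks ↔ v ∈ pl1 ∨ v ∈ pl2 := by
    intro v
    rw [hks, PySem.List.mem_sorted, PySem.Set.mem_ofList, List.mem_append,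
      PySem.Set.mem_ofList, PySem.Set.mem_ofList]
  have hp1 : s1.Pairwise (· ≤ ·) := PySem.List.sorted_pairwise pl1 (fun x => x) 
  have hp2 : s2.Pairwise (· ≤ ·) := PySem.List.sorted_pairwise pl2 (fun x => x)
  have hperm : (pvMergeA s1 s2).Perm (ks.flatMap (fun v => List.replicate (m v) v)) := by
    rw [List.perm_iff_count]
    intro v
    rw [pvMergeA_count s1 s2 hp1 hp2 v,
      count_flatMap_replicate ks m hkslt.nodup v,
      (PySem.List.sorted_perm pl1 (fun x => x) false).count_eq,
      (PySem.List.sorted_perm pl2 (fun x => x) false).count_eq]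
    by_cases hv : v ∈ ks
    · rw [if_pos hv, hm]
      simp only []
      rw [show ((max ((List.count v pl1 : Int)) ((List.count v pl2 : Int))).toNat) = max (List.count v pl1) (List.count v pl2) by rw [← Nat.cast_max, Int.toNat_natCast]]
    · rw [if_neg hv]
      rw [hmemks] at hv
      rw [not_or] at hv
      rw [List.count_eq_zero_of_not_mem hv.1, List.count_eq_zero_of_not_mem hv.2]
      simp
  exact hperm.eq_of_pairwise (fun a b _ _ h1 h2 => le_antisymm h1 h2) (pvMergeA_pairwise s1 s2 hp1 hp2) (pairwise_flatMap_replicate ks m hkslt)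

-- ===== VERDICT (by name: the statement is the Claim_ definition above) =====
theorem posting_lists_union_spec : Claim_equal_posting_lists_union := by
  intro pl1 pl2 _
  unfold Spec_posting_lists_union posting_lists_union
  exact pv_main pl1 pl2
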